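-- pv_equiv track=rewrite | github.com/ipython/ipython | nbconvert/filters/latex.py | rm_math_space
-- ===== SOURCE A (Python) =====
-- def rm_math_space(text):
--     """
--     Remove the space between latex math commands and enclosing $ symbols.
--     This filter is important because latex isn't as flexible as the notebook
--     front end when it comes to flagging math using ampersand symbols.
--
--     Parameters
--     ----------
--     text : str
--         Text to filter.
--     """
--
--     # First, scan through the markdown looking for $.  If
--     # a $ symbol is found, without a preceding \, assume
--     # it is the start of a math block.  UNLESS that $ is
--     # not followed by another within two math_lines.
--     math_regions = []
--     math_lines = 0
--     within_math = False
--     math_start_index = 0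
--     ptext = ''
--     last_character = ""
--     skip = False
--     for index, char in enumerate(text):
--
--         #Make sure the character isn't preceeded by a backslash
--         if (char == "$" and last_character != "\\"):
--
--             # Close the math region if this is an ending $
--             if within_math:
--                 within_math = False
--                 skip = True
--                 ptext = ptext+'$'+text[math_start_index+1:index].strip()+'$'
--                 math_regions.append([math_start_index, index+1])
--             else:
--
--                 # Start a new math region
--                 within_math = True
--                 math_start_index = index
--                 math_lines = 0
--
--         # If we are in a math region, count the number of lines parsed.
--         # Cancel the math region if we find two line breaks!
--         elif char == "\n":
--             if within_math:
--                 math_lines += 1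
--                 if math_lines > 1:
--                     within_math = False
--                     ptext = ptext+text[math_start_index:index]
--
--         # Remember the last character so we can easily watch
--         # for backslashes
--         last_character = char
--         if not within_math and not skip:
--             ptext = ptext+char
--         if skip:
--             skip = False
--     return ptext
-- ===== SOURCE B (Python) =====
-- def rm_math_space(text):
--     """
--     Remove the space between latex math commands and enclosing $ symbols.
--
--     Two-pass re-implementation: a scanner first splits the text into an
--     ordered list of segments -- plain slices (emitted verbatim, including a
--     canceled math region together with the newline that canceled it) and
--     closed math regions (whose inner content is stripped and re-wrapped in
--     $...$); an unclosed trailing math region produces no segment.  A second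
--     pass joins the rendered segments.
--     """
--     segments = []          # ('plain', s) or ('math', inner)
--     plain_start = 0        # start of the current plain slice
--     math_start = None      # index of the opening '$' while inside math
--     newlines = 0
--     prev = ""
--     for i, ch in enumerate(text):
--         if ch == "$" and prev != "\\":
--             if math_start is None:
--                 segments.append(('plain', text[plain_start:i]))
--                 math_start = i
--                 newlines = 0
--             else:
--                 segments.append(('math', text[math_start + 1:i]))
--                 math_start = None
--                 plain_start = i + 1
--         elif ch == "\n" and math_start is not None:
--             newlines += 1
--             if newlines > 1:
--                 segments.append(('plain', text[math_start:i]))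
--                 math_start = None
--                 plain_start = i      # the canceling newline stays plain
--         prev = ch
--     if math_start is None:
--         segments.append(('plain', text[plain_start:]))
--     return ''.join(s if k == 'plain' else '$' + s.strip() + '$'
--                    for k, s in segments)
-- ===== Notes on version B (the rewrite author's own statement) =====
-- stated objective: faster
-- what changed: Replaces A's single interleaved state machine (ptext built char-by-char with within_math/skip/last_character flags) by a two-pass decomposition: a scanner splits the text into an ordered list of plain/math segments (canceled regions emitted as plain slices, an unclosed trailing math region dropped), then a second pass renders and joins them, wrapping stripped math content in $...$. Mechanism: plain text is copied as whole slices and joined once instead of appended character by character.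
import Mathlib
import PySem

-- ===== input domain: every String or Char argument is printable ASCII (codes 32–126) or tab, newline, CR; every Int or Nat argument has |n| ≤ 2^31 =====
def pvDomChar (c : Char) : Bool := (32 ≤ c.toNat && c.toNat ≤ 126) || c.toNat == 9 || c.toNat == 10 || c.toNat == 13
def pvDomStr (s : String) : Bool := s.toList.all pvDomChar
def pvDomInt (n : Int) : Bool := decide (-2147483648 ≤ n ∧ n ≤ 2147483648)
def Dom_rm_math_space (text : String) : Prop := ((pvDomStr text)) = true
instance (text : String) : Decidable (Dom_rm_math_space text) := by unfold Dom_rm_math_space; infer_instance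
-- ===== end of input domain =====

-- B replaces A's interleaved char-by-char state machine by a two-pass decomposition
-- (scan into plain/math segments, then render and join); objective: alternative structure.

-- ===== PORT A =====
-- literal transliteration of A's single loop: state = (math_regions, math_lines,
-- within_math, math_start_index, ptext, last_character); skip is set and cleared
-- within one iteration, so it is inlined into each branch's "append char or not".
def rmLoopA (cs : List Char) (rem : List Char) (idx : Nat)
    (regions : List (Nat × Nat)) (mlines : Nat) (within : Bool) (mstart : Nat)
    (ptext : List Char) (lastc : List Char) : List Char :=
  match rem with
  | [] => ptext
  | c :: rest =>
    if c = '$' ∧ lastc ≠ ['\\'] then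
      if within then
        -- close: skip = True, so the '$' itself is not re-appended
        rmLoopA cs rest (idx+1) (regions ++ [(mstart, idx+1)]) mlines false mstart
          (ptext ++ '$' :: PySem.Chars.strip
              (PySem.List.slice cs (some ((mstart+1 : Nat) : Int)) (some ((idx : Nat) : Int)))
            ++ ['$']) [c]
      else
        -- open a math region (within' = true, so the '$' is not appended)
        rmLoopA cs rest (idx+1) regions 0 true idx ptext [c]
    else if c = '\n' then
      if within then
        if mlines + 1 > 1 then
          -- cancel: emit raw region, then the newline itself (within' false, skip false)
          rmLoopA cs rest (idx+1) regions (mlines+1) false mstart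
            (ptext ++ PySem.List.slice cs (some ((mstart : Nat) : Int)) (some ((idx : Nat) : Int))
              ++ [c]) [c]
        else
          rmLoopA cs rest (idx+1) regions (mlines+1) true mstart ptext [c]
      else
        rmLoopA cs rest (idx+1) regions mlines false mstart (ptext ++ [c]) [c]
    else
      rmLoopA cs rest (idx+1) regions mlines within mstart
        (if within then ptext else ptext ++ [c]) [c]

def rm_math_space (text : String) : String :=
  String.ofList (rmLoopA text.toList text.toList 0 [] 0 false 0 [] [])

-- ===== PORT B =====
inductive PSeg where
  | plain : List Char → PSeg
  | math : List Char → PSeg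
deriving DecidableEq, Repr

-- rendering of one segment ('plain' verbatim, 'math' stripped and re-wrapped)
def pvRenderSeg : PSeg → List Char
  | .plain s => s
  | .math s => '$' :: PySem.Chars.strip s ++ ['$']

-- first pass: scan the text into an ordered segment list
def rmScanB (cs : List Char) (rem : List Char) (i : Nat) (plainStart : Nat)
    (mathStart : Option Nat) (newlines : Nat) (prev : List Char)
    (acc : List PSeg) : List PSeg :=
  match rem with
  | [] =>
    match mathStart with
    | none => acc ++ [.plain (PySem.List.slice cs (some ((plainStart : Nat) : Int)) none)]
    | some _ => acc          -- unclosed trailing math region: dropped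
  | c :: rest =>
    if c = '$' ∧ prev ≠ ['\\'] then
      match mathStart with
      | none =>
        rmScanB cs rest (i+1) plainStart (some i) 0 [c]
          (acc ++ [.plain (PySem.List.slice cs (some ((plainStart : Nat) : Int)) (some ((i : Nat) : Int)))])
      | some ms =>
        rmScanB cs rest (i+1) (i+1) none newlines [c]
          (acc ++ [.math (PySem.List.slice cs (some ((ms+1 : Nat) : Int)) (some ((i : Nat) : Int)))])
    else if c = '\n' then
      match mathStart with
      | some ms =>
        if newlines + 1 > 1 then
          rmScanB cs rest (i+1) i none (newlines+1) [c]
            (acc ++ [.plain (PySem.List.slice cs (some ((ms : Nat) : Int)) (some ((i : Nat) : Int)))])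
        else
          rmScanB cs rest (i+1) plainStart (some ms) (newlines+1) [c] acc
      | none => rmScanB cs rest (i+1) plainStart none newlines [c] acc
    else
      rmScanB cs rest (i+1) plainStart mathStart newlines [c] acc

-- second pass: ''.join of the rendered segments
def pvRender (segs : List PSeg) : List Char := (segs.map pvRenderSeg).flatten

def rm_math_space_alt (text : String) : String :=
  String.ofList (pvRender (rmScanB text.toList text.toList 0 0 none 0 [] []))

-- ===== PRECONDITION & SPEC =====
def Spec_rm_math_space (text : String) (out : String) : Prop := out = rm_math_space_alt text
instance (text : String) (out : String) : Decidable (Spec_rm_math_space text out) := by unfold Spec_rm_math_space; infer_instance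

-- ===== CLAIM (what is proved, stated in full; the proofs are below) =====
def Claim_equal_rm_math_space : Prop := ∀ (text : String), Dom_rm_math_space text → Spec_rm_math_space text (rm_math_space text)

-- ===== LEMMAS AND PROOFS =====

theorem slice_snoc (cs : List Char) (ps idx : Nat) (hps : ps ≤ idx) (hidx : idx < cs.length) :
    PySem.List.slice cs (some ((ps : Nat) : Int)) (some (((idx+1) : Nat) : Int))
      = PySem.List.slice cs (some ((ps : Nat) : Int)) (some ((idx : Nat) : Int)) ++ [cs[idx]] := by
  rw [PySem.List.slice_natCast, PySem.List.slice_natCast]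
  have hlt : idx - ps < (cs.drop ps).length := by simp [List.length_drop]; omega
  have : idx + 1 - ps = (idx - ps) + 1 := by omega
  rw [this, List.take_add_one, List.getElem?_eq_getElem hlt]
  simp [List.getElem_drop]
  congr 2
  omega

theorem slice_empty (cs : List Char) (ps : Nat) :
    PySem.List.slice cs (some ((ps : Nat) : Int)) (some ((ps : Nat) : Int)) = [] := by
  rw [PySem.List.slice_natCast]; simp

theorem slice_to_end (cs : List Char) (ps idx : Nat) (h : cs.length ≤ idx) :
    PySem.List.slice cs (some ((ps : Nat) : Int)) (some ((idx : Nat) : Int))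
      = PySem.List.slice cs (some ((ps : Nat) : Int)) none := by
  rw [PySem.List.slice_natCast, PySem.List.slice_from_natCast]
  apply List.take_of_length_le
  simp [List.length_drop]; omega

-- the loop invariant: A's interleaved state is the rendering of B's segments so far
theorem loop_eq (cs : List Char) : ∀ (rem : List Char) (idx : Nat)
    (regions : List (Nat × Nat)) (mlines newlines : Nat) (mstartOpt : Option Nat)
    (mstartA plainStart : Nat) (lastc : List Char) (acc : List PSeg) (ptext : List Char),
    rem = cs.drop idx →
    (match mstartOpt with
     | none => plainStart ≤ idx ∧
         ptext = pvRender acc ++ PySem.List.slice cs (some ((plainStart : Nat) : Int)) (some ((idx : Nat) : Int))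
     | some ms => mstartA = ms ∧ mlines = newlines ∧ ptext = pvRender acc) →
    rmLoopA cs rem idx regions mlines mstartOpt.isSome mstartA ptext lastc
      = pvRender (rmScanB cs rem idx plainStart mstartOpt newlines lastc acc) := by
  intro rem
  induction rem with
  | nil =>
    intro idx regions mlines newlines mstartOpt mstartA plainStart lastc acc ptext hrem hinv
    have hlen : cs.length ≤ idx := by
      by_contra h
      have : cs.drop idx ≠ [] := by
        simp [List.drop_eq_nil_iff]; omega
      exact this hrem.symm
    cases mstartOpt with
    | none =>
      obtain ⟨hps, hpt⟩ := hinv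
      simp [rmLoopA, rmScanB, hpt, pvRender, pvRenderSeg,
        slice_to_end cs plainStart idx hlen]
    | some ms =>
      obtain ⟨_, _, hpt⟩ := hinv
      simp [rmLoopA, rmScanB, hpt]
  | cons c rest ih =>
    intro idx regions mlines newlines mstartOpt mstartA plainStart lastc acc ptext hrem hinv
    have hidx : idx < cs.length := by
      by_contra h
      have : cs.drop idx = [] := List.drop_eq_nil_iff.mpr (by omega)
      rw [this] at hrem; exact (List.cons_ne_nil c rest) hrem
    have hc : cs[idx] = c := by
      have h0 : (cs.drop idx)[0]'(by rw [← hrem]; simp) = c := by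
        simp [← hrem]
      simpa using h0
    have hrest : rest = cs.drop (idx + 1) := by
      have : cs.drop (idx + 1) = (cs.drop idx).drop 1 := by
        rw [List.drop_drop]
      rw [this, ← hrem]; rfl
    cases mstartOpt with
    | none =>
      obtain ⟨hps, hpt⟩ := hinv
      by_cases hd : c = '$' ∧ lastc ≠ ['\\']
      · -- open a math region
        simp only [rmLoopA, rmScanB, if_pos hd, Option.isSome_none]
        have := ih (idx+1) regions 0 0 (some idx) idx plainStart [c]
          (acc ++ [.plain (PySem.List.slice cs (some ((plainStart : Nat) : Int)) (some ((idx : Nat) : Int)))])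
          ptext hrest (by simp [pvRender, pvRenderSeg, hpt])
        simpa using this
      · by_cases hn : c = '\n'
        · -- newline outside math: plain append
          simp only [rmLoopA, rmScanB, if_neg hd, if_pos hn, Option.isSome_none]
          have := ih (idx+1) regions mlines newlines none mstartA plainStart [c] acc (ptext ++ [c])
            hrest (by
              refine ⟨by omega, ?_⟩
              rw [hpt, slice_snoc cs plainStart idx hps hidx, hc]
              simp)
          simpa using this
        · -- ordinary character outside math
          simp only [rmLoopA, rmScanB, if_neg hd, if_neg hn, Option.isSome_none, Bool.false_eq_true,
            if_false]
          have := ih (idx+1) regions mlines newlines none mstartA plainStart [c] acc (ptext ++ [c])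
            hrest (by
              refine ⟨by omega, ?_⟩
              rw [hpt, slice_snoc cs plainStart idx hps hidx, hc]
              simp)
          simpa using this
    | some ms =>
      obtain ⟨hms, hml, hpt⟩ := hinv
      by_cases hd : c = '$' ∧ lastc ≠ ['\\']
      · -- close the math region
        simp only [rmLoopA, rmScanB, if_pos hd, Option.isSome_some]
        have := ih (idx+1) (regions ++ [(mstartA, idx+1)]) mlines newlines none mstartA (idx+1) [c]
          (acc ++ [.math (PySem.List.slice cs (some ((ms+1 : Nat) : Int)) (some ((idx : Nat) : Int)))])
          (ptext ++ '$' :: PySem.Chars.strip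
              (PySem.List.slice cs (some ((mstartA+1 : Nat) : Int)) (some ((idx : Nat) : Int)))
            ++ ['$'])
          hrest (by
            refine ⟨le_refl _, ?_⟩
            rw [slice_empty, hpt, hms]
            simp [pvRender, pvRenderSeg])
        simpa using this
      · by_cases hn : c = '\n'
        · by_cases h2 : mlines + 1 > 1
          · -- second newline: cancel the region, emit it and the newline verbatim
            simp only [rmLoopA, rmScanB, if_neg hd, if_pos hn, if_pos h2, ← hml, Option.isSome_some]
            have := ih (idx+1) regions (mlines+1) (mlines+1) none mstartA idx [c]
              (acc ++ [.plain (PySem.List.slice cs (some ((ms : Nat) : Int)) (some ((idx : Nat) : Int)))])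
              (ptext ++ PySem.List.slice cs (some ((mstartA : Nat) : Int)) (some ((idx : Nat) : Int)) ++ [c])
              hrest (by
                refine ⟨by omega, ?_⟩
                rw [slice_snoc cs idx idx (le_refl idx) hidx, slice_empty, hc, hpt, hms]
                simp [pvRender, pvRenderSeg])
            simpa using this
          · -- first newline inside math
            simp only [rmLoopA, rmScanB, if_neg hd, if_pos hn, if_neg h2, ← hml, Option.isSome_some]
            have := ih (idx+1) regions (mlines+1) (mlines+1) (some ms) mstartA plainStart [c] acc ptext
              hrest ⟨hms, rfl, hpt⟩
            simpa using this
        · -- ordinary character (or escaped '$') inside math: nothing emitted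
          simp only [rmLoopA, rmScanB, if_neg hd, if_neg hn, Option.isSome_some, if_true]
          have := ih (idx+1) regions mlines newlines (some ms) mstartA plainStart [c] acc ptext
            hrest ⟨hms, hml, hpt⟩
          simpa using this

-- ===== VERDICT (by name: the statement is the Claim_ definition above) =====
theorem rm_math_space_spec : Claim_equal_rm_math_space := by
  intro text _
  unfold Spec_rm_math_space rm_math_space rm_math_space_alt
  congr 1
  exact loop_eq text.toList text.toList 0 [] 0 0 none 0 0 [] [] []
    (by simp) (by refine ⟨le_refl 0, ?_⟩; rw [PySem.List.slice_natCast]; simp [pvRender])
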